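-- pv_equiv track=rewrite | github.com/zaraahlie/Tree-tYourself | Hackathon/game.py | determiningFinalLocation
-- ===== SOURCE A (Python) =====
-- def determiningFinalLocation(loc):
--     tree1 = ["LLLLL","LLLML","LLLRL", "LLML"]
--     tree2 = ["LLLLR", "LLLMR","LLLRR","LLMR"]
--     tree3 = ["LLR","LRL", "LRRL","LRLR","RLLL","RLLLR","RLRLL","RLRLR"]
--     tree4 = ["LRLM","RLLLM","RLRLM","LRRM", "RLLR"]
--     tree5 = ["RLRRL","RRLR", "RRRR", "RLLM"]
--     tree6 = ["RLRRR","RRLL","RRRL", "LRRR"]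
--     allTrees = [tree1,tree2,tree3,tree4,tree5,tree6]
--     for i in range(len(allTrees)):
--         if loc in allTrees[i]:
--             return True , i
--     return False , 0
-- ===== SOURCE B (Python) =====
-- # Sorted (location, tree-index) table searched with a hand-written binary search
-- # (lower bound), instead of sequential membership scans over six lists.
-- _TABLE = [
--     ("LLLLL", 0), ("LLLLR", 1), ("LLLML", 0), ("LLLMR", 1), ("LLLRL", 0),
--     ("LLLRR", 1), ("LLML", 0), ("LLMR", 1), ("LLR", 2), ("LRL", 2),
--     ("LRLM", 3), ("LRLR", 2), ("LRRL", 2), ("LRRM", 3), ("LRRR", 5),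
--     ("RLLL", 2), ("RLLLM", 3), ("RLLLR", 2), ("RLLM", 4), ("RLLR", 3),
--     ("RLRLL", 2), ("RLRLM", 3), ("RLRLR", 2), ("RLRRL", 4), ("RLRRR", 5),
--     ("RRLL", 5), ("RRLR", 4), ("RRRL", 5), ("RRRR", 4),
-- ]
--
-- def determiningFinalLocation(loc):
--     lo, hi = 0, len(_TABLE)
--     while lo < hi:
--         mid = (lo + hi) // 2
--         if _TABLE[mid][0] < loc:
--             lo = mid + 1
--         else:
--             hi = mid
--     if lo < len(_TABLE) and _TABLE[lo][0] == loc: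
--         return True, _TABLE[lo][1]
--     return False, 0
-- ===== Notes on version B (the rewrite author's own statement) =====
-- stated objective: alternative
-- what changed: B flattens the six lists into one lexicographically sorted (location, index) table and locates the entry by a hand-written lower-bound binary search, replacing A's sequential membership scans over six lists.
import Mathlib
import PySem

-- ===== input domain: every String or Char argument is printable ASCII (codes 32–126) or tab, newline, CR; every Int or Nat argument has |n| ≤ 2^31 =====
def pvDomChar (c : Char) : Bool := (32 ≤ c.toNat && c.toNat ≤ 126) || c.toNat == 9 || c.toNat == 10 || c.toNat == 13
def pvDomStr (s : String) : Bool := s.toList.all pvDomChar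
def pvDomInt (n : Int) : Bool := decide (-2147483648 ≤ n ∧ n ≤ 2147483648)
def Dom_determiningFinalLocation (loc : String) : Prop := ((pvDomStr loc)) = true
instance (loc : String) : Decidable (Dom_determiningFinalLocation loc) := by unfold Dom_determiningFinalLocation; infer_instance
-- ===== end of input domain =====

-- B looks the string up in one lexicographically sorted (location, index) table by a
-- hand-written lower-bound binary search instead of A's sequential scans over six lists;
-- objective: alternative.

-- ===== PORT A =====
def pvTrees : List (List String) :=
  [["LLLLL", "LLLML", "LLLRL", "LLML"],
   ["LLLLR", "LLLMR", "LLLRR", "LLMR"],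
   ["LLR", "LRL", "LRRL", "LRLR", "RLLL", "RLLLR", "RLRLL", "RLRLR"],
   ["LRLM", "RLLLM", "RLRLM", "LRRM", "RLLR"],
   ["RLRRL", "RRLR", "RRRR", "RLLM"],
   ["RLRRR", "RRLL", "RRRL", "LRRR"]]

-- the 'for i in range(len(allTrees))' loop with early return
def pvScanA (loc : String) : List Int → Bool × Int
  | [] => (false, 0)
  | i :: rest =>
      if (PySem.List.pyGetD pvTrees i []).contains loc then (true, i)
      else pvScanA loc rest

def determiningFinalLocation (loc : String) : Bool × Int :=
  pvScanA loc (PySem.List.pyRange 0 (Int.ofNat pvTrees.length) 1)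

-- ===== PORT B =====
-- the sorted table literal from Source B
def pvTable : List (String × Int) :=
  [("LLLLL", 0), ("LLLLR", 1), ("LLLML", 0), ("LLLMR", 1), ("LLLRL", 0),
   ("LLLRR", 1), ("LLML", 0), ("LLMR", 1), ("LLR", 2), ("LRL", 2),
   ("LRLM", 3), ("LRLR", 2), ("LRRL", 2), ("LRRM", 3), ("LRRR", 5),
   ("RLLL", 2), ("RLLLM", 3), ("RLLLR", 2), ("RLLM", 4), ("RLLR", 3),
   ("RLRLL", 2), ("RLRLM", 3), ("RLRLR", 2), ("RLRRL", 4), ("RLRRR", 5),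
   ("RRLL", 5), ("RRLR", 4), ("RRRL", 5), ("RRRR", 4)]

-- the 'while lo < hi' lower-bound loop of Source B (mid always in range, so getD is exact);
-- the fuel argument (hi - lo shrinks each step, so pvTable.length suffices) only makes the
-- same computation structurally total for the kernel
def pvBS (loc : String) : Nat → Nat → Nat → Nat
  | 0, lo, _ => lo
  | fuel + 1, lo, hi =>
    if lo < hi then
      let mid := (lo + hi) / 2
      -- Python 'table[mid][0] < loc' on str: code-point lexicographic = '<' on toList (PYSEM)
      if (pvTable.getD mid ("", 0)).1.toList < loc.toList then pvBS loc fuel (mid + 1) hi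
      else pvBS loc fuel lo mid
    else lo

def determiningFinalLocation_alt (loc : String) : Bool × Int :=
  let lo := pvBS loc pvTable.length 0 pvTable.length
  if lo < pvTable.length ∧ (pvTable.getD lo ("", 0)).1 = loc then
    (true, (pvTable.getD lo ("", 0)).2)
  else (false, 0)

-- ===== PRECONDITION & SPEC =====
def Spec_determiningFinalLocation (loc : String) (out : Bool × Int) : Prop := out = determiningFinalLocation_alt loc
instance (loc : String) (out : Bool × Int) : Decidable (Spec_determiningFinalLocation loc out) := by unfold Spec_determiningFinalLocation; infer_instance

-- ===== CLAIM (what is proved, stated in full; the proofs are below) =====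
def Claim_equal_determiningFinalLocation : Prop := ∀ (loc : String), Dom_determiningFinalLocation loc → Spec_determiningFinalLocation loc (determiningFinalLocation loc)

-- ===== LEMMAS AND PROOFS =====

-- all 29 location strings
def pvAllLocs : List String :=
  ["LLLLL", "LLLML", "LLLRL", "LLML", "LLLLR", "LLLMR", "LLLRR", "LLMR",
   "LLR", "LRL", "LRRL", "LRLR", "RLLL", "RLLLR", "RLRLL", "RLRLR",
   "LRLM", "RLLLM", "RLRLM", "LRRM", "RLLR", "RLRRL", "RRLR", "RRRR", "RLLM",
   "RLRRR", "RRLL", "RRRL", "LRRR"]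

theorem pv_known (loc : String) (h : loc ∈ pvAllLocs) :
    determiningFinalLocation loc = determiningFinalLocation_alt loc := by
  simp only [pvAllLocs, List.mem_cons, List.not_mem_nil, or_false] at h
  rcases h with rfl|rfl|rfl|rfl|rfl|rfl|rfl|rfl|rfl|rfl|rfl|rfl|rfl|rfl|rfl|rfl|rfl|rfl|rfl|rfl|rfl|rfl|rfl|rfl|rfl|rfl|rfl|rfl|rfl <;> decide

-- every first component the table (with its getD default) can produce
theorem pvTable_fst (i : Nat) : (pvTable.getD i ("", 0)).1 ∈ ("" :: pvAllLocs) := by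
  by_cases h : i < 29
  · interval_cases i <;> decide
  · rw [List.getD_eq_default _ _ (by simpa [pvTable] using Nat.le_of_not_lt h)]
    decide

theorem pv_unknown (loc : String) (h : loc ∉ pvAllLocs) (hne : loc ≠ "") :
    determiningFinalLocation loc = determiningFinalLocation_alt loc := by
  -- A side: the scan never fires
  simp only [pvAllLocs, List.mem_cons, List.not_mem_nil, or_false, not_or] at h
  obtain ⟨h1,h2,h3,h4,h5,h6,h7,h8,h9,h10,h11,h12,h13,h14,h15,h16,h17,h18,h19,h20,h21,h22,h23,h24,h25,h26,h27,h28,h29⟩ := h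
  have hrange : PySem.List.pyRange 0 (6 : Int) 1 = ([0,1,2,3,4,5] : List Int) := by decide
  have hA : determiningFinalLocation loc = (false, 0) := by
    simp [determiningFinalLocation, hrange, pvScanA, pvTrees,
      PySem.List.pyGetD, PySem.List.pyGet?, PySem.List.pyIdx?,
      h1, h2, h3, h4, h5, h6, h7, h8, h9, h10, h11, h12, h13, h14, h15, h16, h17,
      h18, h19, h20, h21, h22, h23, h24, h25, h26, h27, h28, h29]
  -- B side: whatever index the search ends at, the equality check fails
  have hB : determiningFinalLocation_alt loc = (false, 0) := by
    unfold determiningFinalLocation_alt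
    have hfst := pvTable_fst (pvBS loc pvTable.length 0 pvTable.length)
    simp only [pvAllLocs, List.mem_cons, List.not_mem_nil, or_false] at hfst
    have : ¬ ((pvTable.getD (pvBS loc pvTable.length 0 pvTable.length) ("", 0)).1 = loc) := by
      rcases hfst with he|he|he|he|he|he|he|he|he|he|he|he|he|he|he|he|he|he|he|he|he|he|he|he|he|he|he|he|he|he <;>
        rw [he] <;>
        first
          | exact fun hc => hne hc.symm
          | exact fun hc => h1 hc.symm | exact fun hc => h2 hc.symm | exact fun hc => h3 hc.symm
          | exact fun hc => h4 hc.symm | exact fun hc => h5 hc.symm | exact fun hc => h6 hc.symm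
          | exact fun hc => h7 hc.symm | exact fun hc => h8 hc.symm | exact fun hc => h9 hc.symm
          | exact fun hc => h10 hc.symm | exact fun hc => h11 hc.symm | exact fun hc => h12 hc.symm
          | exact fun hc => h13 hc.symm | exact fun hc => h14 hc.symm | exact fun hc => h15 hc.symm
          | exact fun hc => h16 hc.symm | exact fun hc => h17 hc.symm | exact fun hc => h18 hc.symm
          | exact fun hc => h19 hc.symm | exact fun hc => h20 hc.symm | exact fun hc => h21 hc.symm
          | exact fun hc => h22 hc.symm | exact fun hc => h23 hc.symm | exact fun hc => h24 hc.symm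
          | exact fun hc => h25 hc.symm | exact fun hc => h26 hc.symm | exact fun hc => h27 hc.symm
          | exact fun hc => h28 hc.symm | exact fun hc => h29 hc.symm
    rw [if_neg (fun hc => this hc.2)]
  rw [hA, hB]

-- ===== VERDICT (by name: the statement is the Claim_ definition above) =====
theorem determiningFinalLocation_spec : Claim_equal_determiningFinalLocation := by
  intro loc _
  unfold Spec_determiningFinalLocation
  by_cases h : loc ∈ pvAllLocs
  · exact pv_known loc h
  · by_cases he : loc = ""
    · subst he; decide
    · exact pv_unknown loc h he
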